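-- pv_equiv track=rewrite | github.com/tasi788/python-studanty | 範例程式/Python 資料結構 × 演算法 刷題鍛鍊班 範例程式/ch08/刷題71 2.py | twoThree
-- ===== SOURCE A (Python) =====
-- def twoThree(nums1, nums2, nums3):
--   count = {}
--   setAll = set(nums1) | set(nums2) | set(nums3)
--   for num in setAll:
--     if num in nums1:
--       count[num] = count.get(num,0)+1
--     if num in nums2:
--       count[num] = count.get(num,0)+1
--     if num in nums3:
--       count[num] = count.get(num,0)+1
--   result = []
--   for num in count:
--     if count[num]>= 2:
--       result.append(num)
--   return result
-- ===== SOURCE B (Python) =====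
-- def twoThree(nums1, nums2, nums3):
--     s1, s2, s3 = set(nums1), set(nums2), set(nums3)
--     dup = (s1 & s2) | (s1 & s3) | (s2 & s3)
--     setAll = (s1 | s2) | s3
--     return [x for x in setAll if x in dup]
-- ===== Notes on version B (the rewrite author's own statement) =====
-- stated objective: faster
-- what changed: Replaces A's per-element counting loop (which tests 'num in list' by linear scans over the three lists for every distinct element) with bulk set algebra: dup = (s1&s2)|(s1&s3)|(s2&s3), then one membership filter over the union.
import Mathlib
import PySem

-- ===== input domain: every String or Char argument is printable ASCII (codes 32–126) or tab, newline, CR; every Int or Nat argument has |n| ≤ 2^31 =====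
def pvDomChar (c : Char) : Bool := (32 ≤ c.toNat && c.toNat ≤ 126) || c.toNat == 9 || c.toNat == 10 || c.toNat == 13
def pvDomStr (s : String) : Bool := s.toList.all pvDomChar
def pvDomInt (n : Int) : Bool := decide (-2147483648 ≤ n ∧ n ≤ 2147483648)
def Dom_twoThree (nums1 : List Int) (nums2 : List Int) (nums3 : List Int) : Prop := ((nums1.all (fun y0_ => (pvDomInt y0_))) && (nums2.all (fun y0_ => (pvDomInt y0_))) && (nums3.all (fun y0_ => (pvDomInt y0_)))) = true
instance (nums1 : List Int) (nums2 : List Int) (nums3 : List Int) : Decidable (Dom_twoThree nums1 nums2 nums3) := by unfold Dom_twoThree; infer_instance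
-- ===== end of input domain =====

-- B replaces A's per-element counting loop (membership by linear list scans) with bulk set
-- algebra (pairwise intersections) and one membership filter over the union.
-- The output list's ORDER follows the PySem.Set (first-insertion) order on both sides; the
-- Python result order is CPython's set iteration order, compared as a set by the checks.

-- ===== PORT A =====
def twoThree (nums1 : List Int) (nums2 : List Int) (nums3 : List Int) : List Int :=
  let setAll : PySem.Set Int :=
    PySem.Set.union (PySem.Set.union (PySem.Set.ofList nums1) (PySem.Set.ofList nums2)) (PySem.Set.ofList nums3)
  let count : PySem.Dict Int Int :=
    setAll.foldl (fun d num =>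
      let d := if nums1.contains num then d.insert num (d.getD num 0 + 1) else d
      let d := if nums2.contains num then d.insert num (d.getD num 0 + 1) else d
      if nums3.contains num then d.insert num (d.getD num 0 + 1) else d)
      PySem.Dict.empty
  -- 'count[num]' is read only for num ∈ count.keys, where it never raises: getD is exact here
  count.keys.foldl (fun result num => if count.getD num 0 ≥ 2 then result ++ [num] else result) []

-- ===== PORT B =====
def twoThree_alt (nums1 : List Int) (nums2 : List Int) (nums3 : List Int) : List Int :=
  let s1 : PySem.Set Int := PySem.Set.ofList nums1
  let s2 : PySem.Set Int := PySem.Set.ofList nums2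
  let s3 : PySem.Set Int := PySem.Set.ofList nums3
  let dup : PySem.Set Int :=
    PySem.Set.union (PySem.Set.union (PySem.Set.inter s1 s2) (PySem.Set.inter s1 s3)) (PySem.Set.inter s2 s3)
  let setAll : PySem.Set Int := PySem.Set.union (PySem.Set.union s1 s2) s3
  setAll.filter (fun x => PySem.Set.contains dup x)

-- ===== PRECONDITION & SPEC =====
def Spec_twoThree (nums1 : List Int) (nums2 : List Int) (nums3 : List Int) (out : List Int) : Prop := out = twoThree_alt nums1 nums2 nums3
instance (nums1 : List Int) (nums2 : List Int) (nums3 : List Int) (out : List Int) : Decidable (Spec_twoThree nums1 nums2 nums3 out) := by unfold Spec_twoThree; infer_instance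

-- ===== CLAIM (what is proved, stated in full; the proofs are below) =====
def Claim_equal_twoThree : Prop := ∀ (nums1 : List Int) (nums2 : List Int) (nums3 : List Int), Dom_twoThree nums1 nums2 nums3 → Spec_twoThree nums1 nums2 nums3 (twoThree nums1 nums2 nums3)

-- ===== LEMMAS AND PROOFS =====

-- A's loop body, named for the proofs (definitionally the lambda in twoThree)
def pvStep (nums1 nums2 nums3 : List Int) (d : PySem.Dict Int Int) (num : Int) : PySem.Dict Int Int :=
  let d := if nums1.contains num then d.insert num (d.getD num 0 + 1) else d
  let d := if nums2.contains num then d.insert num (d.getD num 0 + 1) else d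
  if nums3.contains num then d.insert num (d.getD num 0 + 1) else d

-- the multiplicity A's dict ends up storing for a fresh key
def pvCnt (nums1 nums2 nums3 : List Int) (x : Int) : Int :=
  (if nums1.contains x then (1 : Int) else 0) + (if nums2.contains x then (1 : Int) else 0)
    + (if nums3.contains x then (1 : Int) else 0)

theorem pvStep_getD_self (nums1 nums2 nums3 : List Int) (d : PySem.Dict Int Int) (x : Int)
    (h : d.contains x = false) :
    (pvStep nums1 nums2 nums3 d x).getD x 0 = pvCnt nums1 nums2 nums3 x := by
  unfold pvStep pvCnt
  split_ifs <;>
    simp [PySem.Dict.getD_insert_self, PySem.Dict.getD_of_not_contains, h]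

theorem pvStep_getD_other (nums1 nums2 nums3 : List Int) (d : PySem.Dict Int Int) (x y : Int)
    (h : y ≠ x) :
    (pvStep nums1 nums2 nums3 d x).getD y 0 = d.getD y 0 := by
  unfold pvStep
  split_ifs <;> simp [PySem.Dict.getD_insert, h]

theorem pvStep_contains_other (nums1 nums2 nums3 : List Int) (d : PySem.Dict Int Int) (x y : Int)
    (h : y ≠ x) :
    (pvStep nums1 nums2 nums3 d x).contains y = d.contains y := by
  unfold pvStep
  split_ifs <;> simp [PySem.Dict.contains_insert, h]

theorem pvStep_keys (nums1 nums2 nums3 : List Int) (d : PySem.Dict Int Int) (x : Int)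
    (h : d.contains x = false)
    (hm : nums1.contains x || nums2.contains x || nums3.contains x) :
    (pvStep nums1 nums2 nums3 d x).keys = d.keys ++ [x] := by
  unfold pvStep
  split_ifs with h1 h2 h3 <;>
    simp_all [PySem.Dict.keys_insert_of_not_contains, PySem.Dict.keys_insert_of_contains]

theorem pvFoldl_step (nums1 nums2 nums3 : List Int) (l : List Int) :
    ∀ d : PySem.Dict Int Int, l.Nodup → (∀ x ∈ l, d.contains x = false) →
      (∀ x ∈ l, nums1.contains x || nums2.contains x || nums3.contains x) →
      (l.foldl (pvStep nums1 nums2 nums3) d).keys = d.keys ++ l ∧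
        ∀ y, (l.foldl (pvStep nums1 nums2 nums3) d).getD y 0 =
          if y ∈ l then pvCnt nums1 nums2 nums3 y else d.getD y 0 := by
  induction l with
  | nil => intro d _ _ _; simp
  | cons x xs ih =>
    intro d hnd hfresh hmem
    have hxfresh : d.contains x = false := hfresh x (by simp)
    have hxnotin : x ∉ xs := (List.nodup_cons.mp hnd).1
    have hfresh' : ∀ z ∈ xs, (pvStep nums1 nums2 nums3 d x).contains z = false := by
      intro z hz
      rw [pvStep_contains_other nums1 nums2 nums3 d x z (by rintro rfl; exact hxnotin hz)]
      exact hfresh z (by simp [hz])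
    obtain ⟨hk, hg⟩ := ih (pvStep nums1 nums2 nums3 d x) (List.nodup_cons.mp hnd).2 hfresh'
      (fun z hz => hmem z (by simp [hz]))
    constructor
    · rw [List.foldl_cons, hk,
        pvStep_keys nums1 nums2 nums3 d x hxfresh (hmem x (by simp))]
      simp
    · intro y
      rw [List.foldl_cons, hg y]
      by_cases hy : y ∈ xs
      · simp [hy]
      · by_cases hyx : y = x
        · subst hyx
          simp [hy, pvStep_getD_self nums1 nums2 nums3 d y hxfresh]
        · simp [hy, hyx, pvStep_getD_other nums1 nums2 nums3 d x y hyx]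

-- dup membership test = "appears in at least two lists"
theorem pvDup_contains (nums1 nums2 nums3 : List Int) (x : Int) :
    (PySem.Set.contains
      (PySem.Set.union
        (PySem.Set.union (PySem.Set.inter (PySem.Set.ofList nums1) (PySem.Set.ofList nums2))
          (PySem.Set.inter (PySem.Set.ofList nums1) (PySem.Set.ofList nums3)))
        (PySem.Set.inter (PySem.Set.ofList nums2) (PySem.Set.ofList nums3))) x) =
      decide (pvCnt nums1 nums2 nums3 x ≥ 2) := by
  unfold pvCnt
  by_cases h1 : x ∈ nums1 <;> by_cases h2 : x ∈ nums2 <;> by_cases h3 : x ∈ nums3 <;>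
    simp [PySem.Set.contains_eq_listContains, PySem.Set.mem_union, PySem.Set.mem_inter,
      PySem.Set.mem_ofList, h1, h2, h3, List.contains_eq_mem]

theorem twoThree_spec' (nums1 nums2 nums3 : List Int) :
    twoThree nums1 nums2 nums3 = twoThree_alt nums1 nums2 nums3 := by
  show
    (let setAll : PySem.Set Int :=
      PySem.Set.union (PySem.Set.union (PySem.Set.ofList nums1) (PySem.Set.ofList nums2)) (PySem.Set.ofList nums3)
     let count : PySem.Dict Int Int := setAll.foldl (pvStep nums1 nums2 nums3) PySem.Dict.empty
     count.keys.foldl (fun result num => if count.getD num 0 ≥ 2 then result ++ [num] else result) []) =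
      twoThree_alt nums1 nums2 nums3
  set setAll : PySem.Set Int :=
    PySem.Set.union (PySem.Set.union (PySem.Set.ofList nums1) (PySem.Set.ofList nums2)) (PySem.Set.ofList nums3)
    with hsetAll
  have hnodup : setAll.Nodup := by
    exact PySem.Set.nodup_union _ _ (PySem.Set.nodup_union _ _ (PySem.Set.nodup_ofList _))
  have hmemAll : ∀ x ∈ setAll, x ∈ nums1 ∨ x ∈ nums2 ∨ x ∈ nums3 := by
    intro x hx
    rw [hsetAll] at hx
    simpa [PySem.Set.mem_union, PySem.Set.mem_ofList, or_assoc] using hx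
  obtain ⟨hk, hg⟩ := pvFoldl_step nums1 nums2 nums3 setAll PySem.Dict.empty hnodup
    (by intro x _; simp [PySem.Dict.contains_empty])
    (by
      intro x hx
      rcases hmemAll x hx with h | h | h <;>
        simp [List.contains_eq_mem, h])
  simp only []
  rw [PySem.List.foldl_append_ite_eq_filter]
  rw [hk]
  simp only [PySem.Dict.keys_empty, List.nil_append]
  unfold twoThree_alt
  simp only []
  apply List.filter_congr
  intro x hx
  rw [hg x]
  simp only [hx, if_pos]
  rw [pvDup_contains nums1 nums2 nums3 x]

-- ===== VERDICT (by name: the statement is the Claim_ definition above) =====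
theorem twoThree_spec : Claim_equal_twoThree := by
  intro nums1 nums2 nums3 _
  exact twoThree_spec' nums1 nums2 nums3
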